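-- pv_equiv track=rewrite | github.com/DragonlordNewb/clearsight | clearsight_2/cryptography/lxe.py | shuffleKey
-- ===== SOURCE A (Python) =====
-- def _hexadecimalToBinary(n):
-- 	return bin(int(n, 16))[2:]
--
-- def _binaryToHexadecimal(n):
-- 	return hex(int(n, 2))[2:]
--
-- def _binaryToDecimal(n):
-- 	return int(n, 2)
--
-- def _hexadecimalToDecimal(n):
-- 	return _binaryToDecimal(_hexadecimalToBinary(n))
--
-- def shuffleKey(hexkey):
--     # "Shuffle" key
--     binkey = _hexadecimalToBinary(hexkey)
--
--     try:
--         skip = _hexadecimalToDecimal(hexkey[1])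
--     except IndexError:
--         skip = _hexadecimalToDecimal(hexkey[0])
--     except Exception as e:
--         raise e
--
--     newbinkey = []
--     for index in range(len(binkey)):
--         if binkey[:index] == "":
--             targetBitIndex = int(binkey[0])
--         else:
--             targetBitIndex = skip + _binaryToDecimal(binkey[:index])
--         newbinkey.append(binkey[targetBitIndex % len(binkey)])
--
--     newhexkey = _binaryToHexadecimal("".join(newbinkey))
--
--     shuffled = []
--
--     repetitions = 0
--     lastNybble = ""
--     for nybble in newhexkey:
--         if nybble == lastNybble:
--             repetitions += 1
--             if repetitions == 3:
--                 return "".join(shuffled)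
--             shuffled.append(nybble)
--         else:
--             repetitions == 0
--             lastNybble = nybble
--             shuffled.append(nybble)
--
--     return "".join(shuffled)
-- ===== SOURCE B (Python) =====
-- def shuffleKey(hexkey):
--     # O(n) numeric re-implementation: works on the integer itself with shift/mask bit
--     # arithmetic (no binary string, no per-prefix int(...,2) re-parse; the prefix value
--     # is kept reduced mod the bit length), then trims at the 3rd adjacent-duplicate
--     # position found by one scan over adjacent pairs.
--     n = int(hexkey, 16)
--     skip = int(hexkey[1] if len(hexkey) > 1 else hexkey[0], 16)
--     L = max(n.bit_length(), 1)
--     bit = lambda i: (n >> (L - 1 - i)) & 1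
--     m = bit(bit(0) % L)
--     v = 0
--     for i in range(L - 1):
--         v = (2 * v + bit(i)) % L
--         m = m * 2 + bit((skip + v) % L)
--     hexs = format(m, 'x')
--     dups = [i for i, (x, y) in enumerate(zip(hexs, hexs[1:]), 1) if x == y]
--     cut = dups[2] if len(dups) >= 3 else len(hexs)
--     return hexs[:cut]
-- ===== Notes on version B (the rewrite author's own statement) =====
-- stated objective: faster
-- what changed: B never builds the binary string: it works on the integer itself with shift/mask bit extraction, keeps the prefix value reduced mod the bit length as a running accumulator (instead of re-parsing every prefix with int(...,2)), accumulates the shuffled bits directly into an integer, and trims by indexing the 3rd adjacent-duplicate position from one scan over adjacent pairs instead of A's append-and-early-return loop.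
import Mathlib
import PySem

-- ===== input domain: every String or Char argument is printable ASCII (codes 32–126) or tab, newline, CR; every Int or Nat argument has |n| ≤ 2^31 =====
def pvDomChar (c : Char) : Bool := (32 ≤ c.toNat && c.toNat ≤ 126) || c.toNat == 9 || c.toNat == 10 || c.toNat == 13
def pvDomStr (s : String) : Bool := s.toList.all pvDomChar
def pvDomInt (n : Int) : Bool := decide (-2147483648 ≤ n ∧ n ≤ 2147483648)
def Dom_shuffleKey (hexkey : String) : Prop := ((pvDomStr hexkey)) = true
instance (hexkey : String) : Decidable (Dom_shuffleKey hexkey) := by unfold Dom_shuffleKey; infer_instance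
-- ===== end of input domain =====

-- B re-implements A's key shuffle numerically — shift/mask bit extraction on the integer,
-- a running prefix value kept reduced mod the bit length, and trimming at the 3rd
-- adjacent-duplicate position — measured faster than A's per-prefix re-parsing;
-- equality of return values is proved on Pre_ (where the Python A returns normally).

-- ===== PORT A =====

-- int(s, 2) for s a list of '0'/'1' characters (the only inputs it receives here): exact.
def pvBitsVal (cs : List Char) : Nat :=
  cs.foldl (fun a c => a * 2 + (if c = '1' then 1 else 0)) 0

-- hex(n)[2:] for n ≥ 0: lowercase hex digits, no prefix; exact on that domain.
def pvNatToHexAux (n : Nat) : List Char :=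
  if h : n = 0 then []
  else pvNatToHexAux (n / 16) ++
    [if n % 16 < 10 then Char.ofNat (48 + n % 16) else Char.ofNat (87 + n % 16)]
decreasing_by exact Nat.div_lt_self (Nat.pos_of_ne_zero h) (by omega)

def pvNatToHex (n : Nat) : List Char := if n = 0 then ['0'] else pvNatToHexAux n

-- `try: hexkey[1] except IndexError: hexkey[0]` — the one-character string handed to int(·, 16).
-- (defaults are never reached on Pre_: length 0 fails the int(hexkey,16) parse)
def pvSkipChars (hexkey : String) : List Char :=
  if 2 ≤ hexkey.toList.length then [hexkey.toList.getD 1 ' '] else [hexkey.toList.getD 0 ' ']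

-- the body of A's index loop: targetBitIndex for `index`, then binkey[targetBitIndex % len(binkey)]
def fA (BL : List Char) (L skip : Nat) (index : Nat) : Char :=
  let t := if BL.take index = [] then (if BL.getD 0 '0' = '1' then 1 else 0)
           else skip + pvBitsVal (BL.take index)
  BL.getD (t % L) '0'

-- A's trimming loop: shuffled (reversed accumulator), repetitions, lastNybble ("" ↦ none);
-- note A's `repetitions == 0` is a no-op comparison, so repetitions is never reset.
def pvTrimA : List Char → List Char → Nat → Option Char → String
  | [], shuffled, _, _ => String.mk shuffled.reverse
  | c :: rest, shuffled, reps, last =>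
    if some c = last then
      if reps + 1 = 3 then String.mk shuffled.reverse
      else pvTrimA rest (c :: shuffled) (reps + 1) last
    else pvTrimA rest (c :: shuffled) reps (some c)

def shuffleKey (hexkey : String) : String :=
  match PySem.Int.ofStrBase? hexkey 16 with
  | none => ""                    -- int(hexkey, 16) raises ValueError: outside Pre_
  | some n =>
    if n < 0 then ""              -- negative key: A raises (bin's 'b' reaches int(·)): outside Pre_
    else
      let binkey := PySem.Int.toBinChars n          -- bin(n)[2:] for n ≥ 0
      match PySem.Int.ofCharsBase? (pvSkipChars hexkey) 16 with
      | none => ""                -- int(hexkey[1], 16) raises ValueError: outside Pre_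
      | some skipI =>
        let skip := skipI.toNat   -- a single hex digit: 0 ≤ skipI ≤ 15
        let L := binkey.length
        let newbinkey := (List.range L).map (fA binkey L skip)
        let newhexkey := pvNatToHex (pvBitsVal newbinkey)
        pvTrimA newhexkey [] 0 none

-- ===== PORT B =====

-- n.bit_length() for n ≥ 0: exact.
def pvBitLen (n : Nat) : Nat :=
  if h : n = 0 then 0 else pvBitLen (n / 2) + 1
decreasing_by exact Nat.div_lt_self (Nat.pos_of_ne_zero h) (by omega)

-- Source B's `bit = lambda i: (n >> (L - 1 - i)) & 1`
def pvBitB (n L i : Nat) : Nat := (n >>> (L - 1 - i)) &&& 1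

-- one hex digit of format(m, 'x')
def pvHexDigit (d : Nat) : Char := "0123456789abcdef".toList.getD d '0'

-- format(m, 'x') for m > 0, digits accumulated front-to-back
def pvHexLoop (n : Nat) (acc : List Char) : List Char :=
  if h : n = 0 then acc else pvHexLoop (n / 16) (pvHexDigit (n % 16) :: acc)
decreasing_by exact Nat.div_lt_self (Nat.pos_of_ne_zero h) (by omega)

-- Source B's `[i for i, (x, y) in enumerate(zip(hexs, hexs[1:]), 1) if x == y]`
def pvDupsB (cs : List Char) : List Int :=
  ((PySem.List.enumerate (cs.zip (cs.drop 1)) 1).filter (fun p => p.2.1 == p.2.2)).map (·.1)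

def shuffleKey_alt (hexkey : String) : String :=
  match PySem.Int.ofStrBase? hexkey 16 with
  | none => ""                    -- int(hexkey, 16) raises: outside Pre_
  | some nI =>
    if nI < 0 then ""             -- outside Pre_ (Source B only agrees with A on Pre_)
    else
      match PySem.Int.ofCharsBase?
          [if 1 < hexkey.toList.length then hexkey.toList.getD 1 ' '
           else hexkey.toList.getD 0 ' '] 16 with
      | none => ""                -- int of the skip character raises: outside Pre_
      | some sI =>
        let n := nI.toNat
        let skip := sI.toNat
        let L := max (pvBitLen n) 1
        let st := (List.range (L - 1)).foldl
          (fun (st : Nat × Nat) i =>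
            let v := (2 * st.1 + pvBitB n L i) % L
            (v, st.2 * 2 + pvBitB n L ((skip + v) % L)))
          (0, pvBitB n L (pvBitB n L 0 % L))
        let hx := if st.2 = 0 then ['0'] else pvHexLoop st.2 []
        String.mk (hx.take ((pvDupsB hx).getD 2 (hx.length : Int)).toNat)

-- ===== PRECONDITION & SPEC =====

-- Pre_ = exactly the inputs on which A returns normally: int(hexkey,16) parses to a value ≥ 0
-- (negative keys make A call int on bin's 'b' character and raise) and the skip character
-- (hexkey[1], or hexkey[0] for a one-character key) is a hex digit.
def Pre_shuffleKey (hexkey : String) : Prop :=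
  (PySem.Int.ofStrBase? hexkey 16).isSome = true ∧
  0 ≤ (PySem.Int.ofStrBase? hexkey 16).getD 0 ∧
  (PySem.Int.ofCharsBase? (pvSkipChars hexkey) 16).isSome = true

instance (hexkey : String) : Decidable (Pre_shuffleKey hexkey) := by
  unfold Pre_shuffleKey; infer_instance

def pvWitness_shuffleKey : String := "a3"

def Spec_shuffleKey (hexkey : String) (out : String) : Prop := out = shuffleKey_alt hexkey
instance (hexkey : String) (out : String) : Decidable (Spec_shuffleKey hexkey out) := by
  unfold Spec_shuffleKey; infer_instance

-- ===== CLAIM (what is proved, stated in full; the proofs are below) =====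
def Claim_equal_shuffleKey : Prop :=
  ∀ (hexkey : String), Dom_shuffleKey hexkey → Pre_shuffleKey hexkey →
    Spec_shuffleKey hexkey (shuffleKey hexkey)

-- ===== LEMMAS AND PROOFS =====

-- bit value of a binary character (the `if` inside pvBitsVal, as a function)
def cvB (c : Char) : Nat := if c = '1' then 1 else 0

-- binary digits of n, MSB first, empty for 0 (proof-side normal form of Nat.toDigits 2)
def binAux (n : Nat) : List Char :=
  if h : n = 0 then [] else binAux (n / 2) ++ [if n % 2 = 1 then '1' else '0']
decreasing_by exact Nat.div_lt_self (Nat.pos_of_ne_zero h) (by omega)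

-- positions (0-based) of characters equal to their predecessor, previous char in the option
def dupsFrom : Option Char → List Char → List Nat
  | _, [] => []
  | p, c :: rest =>
    if some c = p then 0 :: (dupsFrom (some c) rest).map (· + 1)
    else (dupsFrom (some c) rest).map (· + 1)

lemma digitChar_mod2 (n : Nat) :
    Nat.digitChar (n % 2) = if n % 2 = 1 then '1' else '0' := by
  have h : n % 2 = 0 ∨ n % 2 = 1 := by omega
  rcases h with h | h <;> rw [h] <;> decide

lemma toDigitsCore_eq : ∀ (fuel n : Nat) (ds : List Char), n < fuel →
    Nat.toDigitsCore 2 fuel n ds = (if n = 0 then ['0'] else binAux n) ++ ds := by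
  intro fuel
  induction fuel with
  | zero => intro n ds h; omega
  | succ fuel ih =>
    intro n ds h
    rw [Nat.toDigitsCore]
    by_cases h2 : n / 2 = 0
    · have hn : n = 0 ∨ n = 1 := by omega
      rcases hn with hn | hn <;> subst hn <;>
        simp [binAux, show Nat.digitChar 0 = '0' from by decide,
          show Nat.digitChar 1 = '1' from by decide]
    · have hlt : n / 2 < fuel := by
        have := Nat.div_lt_self (by omega : 0 < n) (by omega : 1 < 2); omega
      simp only [h2, if_false]
      rw [ih (n / 2) _ hlt, if_neg h2]
      have hn0 : ¬ n = 0 := by omega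
      conv_rhs => rw [if_neg hn0, binAux]
      rw [dif_neg hn0]
      simp [digitChar_mod2]

lemma toBinChars_eq (n : Int) (hn : ¬ n < 0) :
    PySem.Int.toBinChars n = if n.toNat = 0 then ['0'] else binAux n.toNat := by
  unfold PySem.Int.toBinChars
  rw [if_neg hn, Nat.toDigits, toDigitsCore_eq _ _ _ (Nat.lt_succ_self _)]
  simp

lemma binAux_len (n : Nat) : (binAux n).length = pvBitLen n := by
  induction n using Nat.strong_induction_on with
  | _ n ih =>
    by_cases h : n = 0
    · subst h; rw [binAux, pvBitLen]; simp
    · rw [binAux, dif_neg h, pvBitLen, dif_neg h]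
      have := ih (n / 2) (Nat.div_lt_self (Nat.pos_of_ne_zero h) (by omega))
      simp [this]

lemma binAux_bin (n : Nat) : ∀ c ∈ binAux n, cvB c ≤ 1 := by
  induction n using Nat.strong_induction_on with
  | _ n ih =>
    by_cases h : n = 0
    · subst h; rw [binAux]; simp
    · rw [binAux, dif_neg h]
      intro c hc
      rcases List.mem_append.1 hc with hc | hc
      · exact ih (n / 2) (Nat.div_lt_self (Nat.pos_of_ne_zero h) (by omega)) c hc
      · simp only [List.mem_singleton] at hc
        subst hc; unfold cvB; split_ifs <;> omega

lemma foldl_bits_shift : ∀ (xs : List Char) (a : Nat),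
    xs.foldl (fun a c => a * 2 + (if c = '1' then 1 else 0)) a
      = a * 2 ^ xs.length + pvBitsVal xs := by
  intro xs
  induction xs with
  | nil => intro a; simp [pvBitsVal]
  | cons c cs ih =>
    intro a
    have hr : pvBitsVal (c :: cs)
        = (0 * 2 + (if c = '1' then 1 else 0)) * 2 ^ cs.length + pvBitsVal cs := by
      unfold pvBitsVal
      rw [List.foldl_cons, ih]
      rfl
    rw [List.foldl_cons, ih, hr, List.length_cons]
    ring

lemma pvBitsVal_append (xs ys : List Char) :
    pvBitsVal (xs ++ ys) = pvBitsVal xs * 2 ^ ys.length + pvBitsVal ys := by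
  unfold pvBitsVal
  rw [List.foldl_append, foldl_bits_shift]
  rfl

lemma binAux_val (n : Nat) : pvBitsVal (binAux n) = n := by
  induction n using Nat.strong_induction_on with
  | _ n ih =>
    by_cases h : n = 0
    · subst h; rw [binAux]; simp [pvBitsVal]
    · rw [binAux, dif_neg h, pvBitsVal_append,
        ih (n / 2) (Nat.div_lt_self (Nat.pos_of_ne_zero h) (by omega))]
      have : pvBitsVal [if n % 2 = 1 then '1' else '0'] = n % 2 := by
        split_ifs with h2 <;> simp [pvBitsVal] <;> omega
      rw [this]
      simp; omega

lemma val_lt (xs : List Char) (hx : ∀ c ∈ xs, cvB c ≤ 1) :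
    pvBitsVal xs < 2 ^ xs.length := by
  induction xs with
  | nil => simp [pvBitsVal]
  | cons c cs ih =>
    have hc : cvB c ≤ 1 := hx c (List.mem_cons_self ..)
    have hcs := ih (fun d hd => hx d (List.mem_cons_of_mem _ hd))
    show cs.foldl _ (0 * 2 + (if c = '1' then 1 else 0)) < _
    rw [foldl_bits_shift]
    have : (if c = '1' then 1 else 0) = cvB c := rfl
    rw [this, List.length_cons, pow_succ]
    nlinarith [pow_pos (show (0:Nat) < 2 by norm_num) cs.length]

lemma take_val (BL : List Char) (n : Nat) (hbin : ∀ c ∈ BL, cvB c ≤ 1)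
    (hv : pvBitsVal BL = n) (i : Nat) (hi : i ≤ BL.length) :
    pvBitsVal (BL.take i) = n / 2 ^ (BL.length - i) := by
  have hsplit : BL = BL.take i ++ BL.drop i := (List.take_append_drop i BL).symm
  have hlen : (BL.drop i).length = BL.length - i := List.length_drop ..
  have hval : n = pvBitsVal (BL.take i) * 2 ^ (BL.length - i) + pvBitsVal (BL.drop i) := by
    rw [← hv]
    conv_lhs => rw [hsplit]
    rw [pvBitsVal_append, hlen]
  have hlt : pvBitsVal (BL.drop i) < 2 ^ (BL.length - i) := by
    have := val_lt (BL.drop i) (fun c hc => hbin c (List.mem_of_mem_drop hc))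
    rwa [hlen] at this
  have hpos : 0 < 2 ^ (BL.length - i) := pow_pos (by norm_num) _
  rw [hval, Nat.mul_comm (pvBitsVal (List.take i BL)) (2 ^ (BL.length - i)),
    Nat.mul_add_div hpos, Nat.div_eq_of_lt hlt]
  omega

lemma take_succ_val (BL : List Char) (j : Nat) (hj : j < BL.length) :
    pvBitsVal (BL.take (j + 1)) = 2 * pvBitsVal (BL.take j) + cvB (BL.getD j '0') := by
  have htake : BL.take (j + 1) = BL.take j ++ [BL[j]] := by
    rw [List.take_succ]; simp [List.getElem?_eq_getElem hj]
  rw [htake, pvBitsVal_append, List.getD_eq_getElem _ _ hj]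
  have : pvBitsVal [BL[j]] = cvB BL[j] := by
    unfold pvBitsVal cvB; simp
  rw [this]
  simp only [List.length_cons, List.length_nil, pow_one, Nat.zero_add]
  omega

lemma bit_eq (BL : List Char) (n : Nat) (hbin : ∀ c ∈ BL, cvB c ≤ 1)
    (hv : pvBitsVal BL = n) (j : Nat) (hj : j < BL.length) :
    pvBitB n BL.length j = cvB (BL.getD j '0') := by
  unfold pvBitB
  rw [Nat.shiftRight_eq_div_pow, Nat.and_one_is_mod]
  have h1 : pvBitsVal (BL.take (j + 1)) = n / 2 ^ (BL.length - 1 - j) := by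
    rw [take_val BL n hbin hv (j + 1) (by omega)]
    congr 1; congr 1; omega
  have h2 : pvBitsVal (BL.take j) = n / 2 ^ (BL.length - j) := by
    rw [take_val BL n hbin hv j (by omega)]
  have h3 : n / 2 ^ (BL.length - j) = n / 2 ^ (BL.length - 1 - j) / 2 := by
    rw [Nat.div_div_eq_div_mul, ← pow_succ]
    congr 2; omega
  have h4 := take_succ_val BL j hj
  rw [h1] at h4
  rw [h2] at h4
  rw [h3] at h4
  omega

lemma pv_mod_shift (a b L : Nat) : (2 * (a % L) + b) % L = (2 * a + b) % L :=
  ((Nat.mod_modEq a L).mul_left 2).add_right b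

lemma pv_mod_add_left (s x L : Nat) : (s + x % L) % L = (s + x) % L :=
  (Nat.mod_modEq x L).add_left s

lemma loop_eq (BL : List Char) (n skip : Nat) (hbin : ∀ c ∈ BL, cvB c ≤ 1)
    (hv : pvBitsVal BL = n) :
    ∀ (cnt j a : Nat), j + cnt + 1 = BL.length →
      ((List.range' j cnt).foldl
        (fun (st : Nat × Nat) i =>
          let v := (2 * st.1 + pvBitB n BL.length i) % BL.length
          (v, st.2 * 2 + pvBitB n BL.length ((skip + v) % BL.length)))
        (pvBitsVal (BL.take j) % BL.length, a)).2
      = ((List.range' (j + 1) cnt).map (fA BL BL.length skip)).foldl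
          (fun x c => x * 2 + (if c = '1' then 1 else 0)) a := by
  intro cnt
  induction cnt with
  | zero => intro j a h; simp
  | succ cnt ih =>
    intro j a h
    have hL0 : 0 < BL.length := by omega
    have hj : j < BL.length := by omega
    rw [List.range'_succ, List.range'_succ]
    have hbit : pvBitB n BL.length j = cvB (BL.getD j '0') := bit_eq BL n hbin hv j hj
    have hstate : (2 * (pvBitsVal (BL.take j) % BL.length) + pvBitB n BL.length j)
        % BL.length = pvBitsVal (BL.take (j + 1)) % BL.length := by
      rw [hbit, pv_mod_shift, take_succ_val BL j hj]
    have hidx : (skip + pvBitsVal (BL.take (j + 1)) % BL.length) % BL.length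
        = (skip + pvBitsVal (BL.take (j + 1))) % BL.length := pv_mod_add_left ..
    have hne : ¬ BL.take (j + 1) = [] := by
      rw [List.take_eq_nil_iff]
      rintro (h' | h')
      · omega
      · rw [h'] at hj; simp at hj
    have hfa : fA BL BL.length skip (j + 1)
        = BL.getD ((skip + pvBitsVal (BL.take (j + 1))) % BL.length) '0' := by
      simp [fA, hne]
    have hemit : pvBitB n BL.length ((skip + pvBitsVal (BL.take (j + 1)) % BL.length)
        % BL.length) = cvB (fA BL BL.length skip (j + 1)) := by
      rw [hidx, hfa]
      exact bit_eq BL n hbin hv _ (Nat.mod_lt _ hL0)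
    simp only [List.foldl_cons, List.map_cons]
    rw [hstate, hemit]
    exact ih (j + 1) (a * 2 + cvB (fA BL BL.length skip (j + 1))) (by omega)

-- the shuffled bit strings of the two ports have the same integer value
lemma shuffle_val (BL : List Char) (n skip : Nat) (hbin : ∀ c ∈ BL, cvB c ≤ 1)
    (hv : pvBitsVal BL = n) (hBL : BL ≠ []) :
    pvBitsVal ((List.range BL.length).map (fA BL BL.length skip))
      = ((List.range (BL.length - 1)).foldl
          (fun (st : Nat × Nat) i =>
            let v := (2 * st.1 + pvBitB n BL.length i) % BL.length
            (v, st.2 * 2 + pvBitB n BL.length ((skip + v) % BL.length)))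
          (0, pvBitB n BL.length (pvBitB n BL.length 0 % BL.length))).2 := by
  have hL0 : 0 < BL.length := List.length_pos_of_ne_nil hBL
  have hm0 : pvBitB n BL.length (pvBitB n BL.length 0 % BL.length)
      = cvB (fA BL BL.length skip 0) := by
    have h0 : pvBitB n BL.length 0 = cvB (BL.getD 0 '0') := bit_eq BL n hbin hv 0 hL0
    have hfa0 : fA BL BL.length skip 0
        = BL.getD ((if BL.getD 0 '0' = '1' then 1 else 0) % BL.length) '0' := by
      simp [fA]
    have : (if BL.getD 0 '0' = '1' then 1 else 0) = cvB (BL.getD 0 '0') := rfl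
    rw [hfa0, this, ← h0]
    exact bit_eq BL n hbin hv _ (Nat.mod_lt _ hL0)
  have hinit : (0 : Nat) = pvBitsVal (BL.take 0) % BL.length := by
    simp [pvBitsVal]
  have hcons : List.range BL.length = 0 :: List.range' 1 (BL.length - 1) := by
    conv_lhs => rw [show BL.length = (BL.length - 1) + 1 by omega]
    rw [List.range_eq_range', List.range'_succ]
  rw [hcons, List.map_cons]
  unfold pvBitsVal
  rw [List.foldl_cons, List.range_eq_range']
  rw [show ((0 : Nat), pvBitB n BL.length (pvBitB n BL.length 0 % BL.length))
        = (pvBitsVal (BL.take 0) % BL.length,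
           pvBitB n BL.length (pvBitB n BL.length 0 % BL.length)) from by simp [pvBitsVal]]
  rw [loop_eq BL n skip hbin hv (BL.length - 1) 0 _ (by omega)]
  rw [show (0 * 2 + (if fA BL BL.length skip 0 = '1' then 1 else 0))
        = pvBitB n BL.length (pvBitB n BL.length 0 % BL.length) from by
      rw [hm0]; unfold cvB; omega]

-- trimming lemmas
lemma getD_map_succ (l : List Nat) (k d : Nat) :
    (l.map (· + 1)).getD k (d + 1) = l.getD k d + 1 := by
  rw [List.getD_eq_getElem?_getD, List.getD_eq_getElem?_getD, List.getElem?_map]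
  cases l[k]? <;> simp

lemma trimA_eq : ∀ (cs acc : List Char) (reps : Nat) (last : Option Char), reps ≤ 2 →
    pvTrimA cs acc reps last
      = String.mk (acc.reverse ++ cs.take ((dupsFrom last cs).getD (2 - reps) cs.length)) := by
  intro cs
  induction cs with
  | nil => intro acc reps last _; simp [pvTrimA, dupsFrom]
  | cons c rest ih =>
    intro acc reps last hreps
    by_cases h1 : some c = last
    · by_cases h2 : reps + 1 = 3
      · have hr : reps = 2 := by omega
        subst hr
        simp [pvTrimA, h1, dupsFrom]
      · have hr : reps ≤ 1 := by omega
        rw [pvTrimA, if_pos h1, if_neg h2, ih (c :: acc) (reps + 1) last (by omega), ← h1]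
        rw [show dupsFrom (some c) (c :: rest) = 0 :: (dupsFrom (some c) rest).map (· + 1)
          from by simp [dupsFrom]]
        rw [show (2 : Nat) - reps = (2 - (reps + 1)) + 1 by omega, List.getD_cons_succ,
          List.length_cons, getD_map_succ, List.take_succ_cons]
        simp
    · rw [pvTrimA, if_neg h1, ih (c :: acc) reps (some c) hreps]
      rw [show dupsFrom last (c :: rest) = (dupsFrom (some c) rest).map (· + 1)
        from by simp [dupsFrom, h1]]
      rw [List.length_cons, getD_map_succ, List.take_succ_cons]
      simp

lemma enum_dups : ∀ (rest : List Char) (prev : Char) (s : Int),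
    ((PySem.List.enumerate ((prev :: rest).zip rest) s).filter
        (fun p => p.2.1 == p.2.2)).map (·.1)
      = (dupsFrom (some prev) rest).map (fun (k : Nat) => s + (k : Int)) := by
  intro rest
  induction rest with
  | nil => intro prev s; rfl
  | cons c rest' ih =>
    intro prev s
    rw [show (prev :: c :: rest').zip (c :: rest') = (prev, c) :: (c :: rest').zip rest'
      from rfl]
    rw [PySem.List.enumerate_cons, List.filter_cons]
    by_cases h : c = prev
    · subst h
      have hb : (((s : Int), (c, c)).2.1 == ((s : Int), (c, c)).2.2) = true := by simp
      simp only [hb, if_true, List.map_cons, ih c (s + 1)]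
      rw [show dupsFrom (some c) (c :: rest') = 0 :: (dupsFrom (some c) rest').map (· + 1)
        from by simp [dupsFrom]]
      simp only [List.map_cons, List.map_map]
      refine congrArg₂ _ (by simp) ?_
      apply List.map_congr_left
      intro k _
      simp only [Function.comp_apply]
      omega
    · have hb : (((s : Int), (prev, c)).2.1 == ((s : Int), (prev, c)).2.2) = false := by
        simpa using fun he => h he.symm
      simp only [hb, Bool.false_eq_true, if_false, ih c (s + 1)]
      rw [show dupsFrom (some prev) (c :: rest') = (dupsFrom (some c) rest').map (· + 1)
        from by simp [dupsFrom, h]]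
      rw [List.map_map]
      apply List.map_congr_left
      intro k _
      simp only [Function.comp_apply]
      omega

lemma dupsB_eq (cs : List Char) :
    pvDupsB cs = (dupsFrom none cs).map (fun (k : Nat) => (k : Int)) := by
  cases cs with
  | nil => rfl
  | cons c rest =>
    unfold pvDupsB
    rw [show (c :: rest).drop 1 = rest from rfl, enum_dups rest c 1]
    rw [show dupsFrom none (c :: rest) = (dupsFrom (some c) rest).map (· + 1)
      from by simp [dupsFrom]]
    rw [List.map_map]
    apply List.map_congr_left
    intro k _
    simp only [Function.comp_apply]
    omega

lemma dupsB_cut (cs : List Char) :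
    ((pvDupsB cs).getD 2 (cs.length : Int)).toNat = (dupsFrom none cs).getD 2 cs.length := by
  rw [dupsB_eq, List.getD_eq_getElem?_getD, List.getD_eq_getElem?_getD, List.getElem?_map]
  cases h : (dupsFrom none cs)[2]? <;> simp

lemma skip_eq (s : String) :
    pvSkipChars s
      = [if 1 < s.toList.length then s.toList.getD 1 ' ' else s.toList.getD 0 ' '] := by
  unfold pvSkipChars
  by_cases h : 2 ≤ s.toList.length
  · rw [if_pos h, if_pos (by omega)]
  · rw [if_neg h, if_neg (by omega)]

lemma hexDigit_eq (d : Nat) (hd : d < 16) :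
    pvHexDigit d = if d < 10 then Char.ofNat (48 + d) else Char.ofNat (87 + d) := by
  interval_cases d <;> decide

lemma hexLoop_eq (n : Nat) : ∀ (acc : List Char),
    pvHexLoop n acc = pvNatToHexAux n ++ acc := by
  induction n using Nat.strong_induction_on with
  | _ n ih =>
    intro acc
    by_cases h : n = 0
    · subst h; rw [pvHexLoop, pvNatToHexAux]; simp
    · rw [pvHexLoop, dif_neg h,
        ih (n / 16) (Nat.div_lt_self (Nat.pos_of_ne_zero h) (by omega)) _,
        hexDigit_eq (n % 16) (Nat.mod_lt _ (by omega))]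
      conv_rhs => rw [pvNatToHexAux]
      rw [dif_neg h]
      simp

lemma hex_eq (m : Nat) : (if m = 0 then ['0'] else pvHexLoop m []) = pvNatToHex m := by
  unfold pvNatToHex
  by_cases h : m = 0
  · simp [h]
  · simp [h, hexLoop_eq]

lemma len_binRep (n : Nat) :
    (if n = 0 then ['0'] else binAux n).length = max (pvBitLen n) 1 := by
  by_cases h : n = 0
  · subst h; rw [pvBitLen]; simp
  · rw [if_neg h, binAux_len]
    have : 1 ≤ pvBitLen n := by rw [pvBitLen, dif_neg h]; omega
    omega

lemma binRep_ne_nil (n : Nat) : (if n = 0 then ['0'] else binAux n) ≠ [] := by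
  by_cases h : n = 0
  · simp [h]
  · rw [if_neg h, binAux, dif_neg h]; simp

lemma binRep_bin (n : Nat) : ∀ c ∈ (if n = 0 then ['0'] else binAux n), cvB c ≤ 1 := by
  by_cases h : n = 0
  · simp [h, cvB]
  · rw [if_neg h]; exact binAux_bin n

lemma binRep_val (n : Nat) : pvBitsVal (if n = 0 then ['0'] else binAux n) = n := by
  by_cases h : n = 0
  · subst h; simp [pvBitsVal]
  · rw [if_neg h]; exact binAux_val n

-- ===== VERDICT (by name: the statement is the Claim_ definition above) =====
theorem shuffleKey_spec : Claim_equal_shuffleKey := by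
  intro hexkey _ _
  unfold Spec_shuffleKey shuffleKey shuffleKey_alt
  rw [skip_eq]
  cases h1 : PySem.Int.ofStrBase? hexkey 16 with
  | none => rfl
  | some n =>
    by_cases hn : n < 0
    · simp [hn]
    · simp only [hn, if_false]
      cases h2 : PySem.Int.ofCharsBase?
          [if 1 < hexkey.toList.length then hexkey.toList.getD 1 ' '
           else hexkey.toList.getD 0 ' '] 16 with
      | none => rfl
      | some skipI =>
        have hBL : PySem.Int.toBinChars n = if n.toNat = 0 then ['0'] else binAux n.toNat :=
          toBinChars_eq n hn
        have hlen : max (pvBitLen n.toNat) 1 = (PySem.Int.toBinChars n).length := by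
          rw [hBL, len_binRep]
        have hbin : ∀ c ∈ PySem.Int.toBinChars n, cvB c ≤ 1 := by
          rw [hBL]; exact binRep_bin n.toNat
        have hv : pvBitsVal (PySem.Int.toBinChars n) = n.toNat := by
          rw [hBL]; exact binRep_val n.toNat
        have hne : PySem.Int.toBinChars n ≠ [] := by
          rw [hBL]; exact binRep_ne_nil n.toNat
        simp only [hlen]
        rw [← shuffle_val (PySem.Int.toBinChars n) n.toNat skipI.toNat hbin hv hne]
        rw [hex_eq]
        rw [trimA_eq _ [] 0 none (by omega), dupsB_cut]
        simp
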